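-- pv_equiv track=rewrite | github.com/oliverking2/PersonalAIAutomation | src/agent/bedrock_client.py | extract_json_from_markdown
-- ===== SOURCE A (Python) =====
-- def extract_json_from_markdown(text: str) -> str:
--     """Extract JSON content from markdown code blocks.
--
--     LLMs sometimes wrap JSON responses in markdown code blocks despite
--     instructions not to. This method extracts the JSON content.
--
--     :param text: Text potentially containing markdown code blocks.
--     :returns: Extracted JSON content, or original text if no code block.
--     """
--     text = text.strip()
--     if not text.startswith("```"):
--         return text
--
--     lines = text.split("\n")
--
--     # Find content between ``` markers
--     in_block = False
--     json_lines: list[str] = []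
--
--     for line in lines:
--         if line.startswith("```"):
--             if in_block:
--                 # End of block
--                 break
--             # Start of block (skip the ``` line itself)
--             in_block = True
--             continue
--         if in_block:
--             json_lines.append(line)
--
--     if not json_lines:
--         # No content found, return original
--         return text
--
--     return "\n".join(json_lines).strip()
-- ===== SOURCE B (Python) =====
-- def extract_json_from_markdown(text: str) -> str:
--     """Extract JSON content from markdown code blocks (index-then-slice)."""
--     text = text.strip()
--     if not text.startswith("```"):
--         return text
--     lines = text.split("\n")
--     fences = [i for i, line in enumerate(lines) if line.startswith("```")]
--     end = fences[1] if len(fences) > 1 else len(lines)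
--     content = lines[1:end]
--     if not content:
--         return text
--     return "\n".join(content).strip()
-- ===== Notes on version B (the rewrite author's own statement) =====
-- stated objective: simpler
-- what changed: Replaces the in_block boolean state machine with a fence-index comprehension plus a single slice lines[1:end], where end is the second fence index or len(lines).
import Mathlib
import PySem

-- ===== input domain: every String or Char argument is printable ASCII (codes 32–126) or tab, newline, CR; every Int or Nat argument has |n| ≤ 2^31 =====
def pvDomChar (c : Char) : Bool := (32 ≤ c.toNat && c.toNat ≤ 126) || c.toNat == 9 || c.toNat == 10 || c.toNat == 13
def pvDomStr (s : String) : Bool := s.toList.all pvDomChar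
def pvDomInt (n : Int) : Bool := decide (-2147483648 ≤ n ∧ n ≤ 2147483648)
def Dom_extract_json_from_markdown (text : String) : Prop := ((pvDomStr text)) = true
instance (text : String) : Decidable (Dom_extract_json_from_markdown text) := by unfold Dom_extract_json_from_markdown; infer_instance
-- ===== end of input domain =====

-- B replaces A's in_block state machine by a fence-index comprehension and a single slice (objective: simpler).

-- ===== PORT A =====
def pvFence : List Char := ['`', '`', '`']

-- A's for-loop with in_block / break, as structural recursion over the same state
def pvALoop (lines : List (List Char)) (inBlock : Bool) (acc : List (List Char)) :
    List (List Char) :=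
  match lines with
  | [] => acc
  | line :: rest =>
    if PySem.Chars.startswith line pvFence then
      if inBlock then acc else pvALoop rest true acc
    else if inBlock then pvALoop rest inBlock (acc ++ [line])
    else pvALoop rest inBlock acc

def extract_json_from_markdown (text : String) : String :=
  let t := PySem.Chars.strip text.toList
  if !PySem.Chars.startswith t pvFence then String.ofList t
  else
    let lines := PySem.Chars.splitOn t ['\n']
    let jsonLines := pvALoop lines false []
    if jsonLines = [] then String.ofList t
    else String.ofList (PySem.Chars.strip (PySem.Chars.join ['\n'] jsonLines))

-- ===== PORT B =====
def extract_json_from_markdown_alt (text : String) : String :=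
  let t := PySem.Chars.strip text.toList
  if !PySem.Chars.startswith t pvFence then String.ofList t
  else
    let lines := PySem.Chars.splitOn t ['\n']
    let fences := (PySem.List.enumerate lines 0).filterMap
        (fun q => if PySem.Chars.startswith q.2 pvFence then some q.1 else none)
    let e : Int := if PySem.List.len fences > 1 then PySem.List.pyGetD fences 1 0
                   else PySem.List.len lines
    let content := PySem.List.slice lines (some 1) (some e)
    if content = [] then String.ofList t
    else String.ofList (PySem.Chars.strip (PySem.Chars.join ['\n'] content))

-- ===== PRECONDITION & SPEC =====
def Spec_extract_json_from_markdown (text : String) (out : String) : Prop := out = extract_json_from_markdown_alt text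
instance (text : String) (out : String) : Decidable (Spec_extract_json_from_markdown text out) := by unfold Spec_extract_json_from_markdown; infer_instance

-- ===== CLAIM (what is proved, stated in full; the proofs are below) =====
def Claim_equal_extract_json_from_markdown : Prop := ∀ (text : String), Dom_extract_json_from_markdown text → Spec_extract_json_from_markdown text (extract_json_from_markdown text)

-- ===== LEMMAS AND PROOFS =====

-- head of splitOn.go once the accumulator is nonempty: the first accumulated piece
theorem pv_go_head_acc (sep : List Char) (fuel : Nat) :
    ∀ (l cur : List Char) (acc : List (List Char)) (a : List Char),
      (PySem.Chars.splitOn.go sep fuel l cur (acc ++ [a])).head? = some a := by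
  induction fuel with
  | zero =>
    intro l cur acc a
    rw [PySem.Chars.splitOn.go]
    simp
  | succ n ih =>
    intro l cur acc a
    cases l with
    | nil => rw [PySem.Chars.splitOn.go]; simp; omega
    | cons c rest =>
      rw [PySem.Chars.splitOn.go]
      by_cases hp : sep.isPrefixOf (c :: rest)
      · simp only [hp, if_true]
        have : cur.reverse :: (acc ++ [a]) = (cur.reverse :: acc) ++ [a] := by simp
        rw [this, ih]
      · simp only [hp, if_false, Bool.false_eq_true]
        exact ih _ _ _ _

-- head of splitOn.go with empty accumulator: cur.reverse ++ the chars before the first newline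
theorem pv_go_head (fuel : Nat) :
    ∀ (l cur : List Char), l.length < fuel →
      (PySem.Chars.splitOn.go ['\n'] fuel l cur []).head? =
        some (cur.reverse ++ l.takeWhile (fun c => c ≠ '\n')) := by
  induction fuel with
  | zero => intro l cur h; omega
  | succ n ih =>
    intro l cur h
    cases l with
    | nil => rw [PySem.Chars.splitOn.go]; simp; omega
    | cons c rest =>
      rw [PySem.Chars.splitOn.go]
      by_cases hc : c = '\n'
      · have hp : List.isPrefixOf ['\n'] (c :: rest) = true := by simp [List.isPrefixOf, hc]
        simp only [hp, if_true]
        have : (cur.reverse :: ([] : List (List Char))) = [] ++ [cur.reverse] := by simp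
        rw [this, pv_go_head_acc]
        simp [List.takeWhile, hc]
      · have hp : List.isPrefixOf ['\n'] (c :: rest) = false := by
          simp [List.isPrefixOf]; exact fun h => hc h.symm
        simp only [hp, Bool.false_eq_true, if_false]
        rw [ih rest (c :: cur) (by simpa using Nat.lt_of_succ_lt_succ h)]
        simp [List.takeWhile, hc]

-- the first line produced by split("\n")
theorem pv_lines_head (t : List Char) :
    (PySem.Chars.splitOn t ['\n']).head? = some (t.takeWhile (fun c => c ≠ '\n')) := by
  rw [PySem.Chars.splitOn]
  simpa using pv_go_head (t.length + 1) t [] (by omega)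

-- A's in-block collection is a takeWhile over the remaining lines
theorem pv_aloop_true (ls : List (List Char)) :
    ∀ acc, pvALoop ls true acc = acc ++ ls.takeWhile (fun l => !PySem.Chars.startswith l pvFence) := by
  induction ls with
  | nil => intro acc; simp [pvALoop]
  | cons l rest ih =>
    intro acc
    by_cases h : PySem.Chars.startswith l pvFence
    · simp [pvALoop, h, List.takeWhile]
    · simp [pvALoop, h, List.takeWhile, ih]

theorem pv_takeWhile_eq_take_findIdx {α : Type} (p : α → Bool) (ls : List α) :
    ls.takeWhile (fun x => !p x) = ls.take (ls.findIdx p) := by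
  induction ls with
  | nil => simp
  | cons x xs ih =>
    by_cases h : p x
    · simp [List.takeWhile, List.findIdx_cons, h]
    · simp [List.takeWhile, List.findIdx_cons, h, ih]

-- head of the fence-index list built from enumerate
theorem pv_fences_head (p : List Char → Bool) (ls : List (List Char)) :
    ∀ (s : Int),
      ((PySem.List.enumerate ls s).filterMap
        (fun q => if p q.2 then some q.1 else none)).head? =
      if ls.any p then some (s + ls.findIdx p) else none := by
  induction ls with
  | nil => intro s; simp [PySem.List.enumerate_nil]
  | cons x xs ih =>
    intro s
    rw [PySem.List.enumerate_cons]
    by_cases h : p x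
    · simp [h, List.findIdx_cons]
    · simp only [List.filterMap_cons, h, Bool.false_eq_true, if_false, List.any_cons,
        Bool.false_or, List.findIdx_cons, ih (s + 1)]
      split
      · simp only [cond_false]
        congr 1
        push_cast
        ring
      · rfl

-- ===== VERDICT (by name: the statement is the Claim_ definition above) =====
theorem extract_json_from_markdown_spec : Claim_equal_extract_json_from_markdown := by
  intro text _
  unfold Spec_extract_json_from_markdown extract_json_from_markdown extract_json_from_markdown_alt
  by_cases h : PySem.Chars.startswith (PySem.Chars.strip text.toList) pvFence
  case neg => simp [h]
  case pos =>
    simp only [h, Bool.not_true, Bool.false_eq_true, if_false]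
    set t := PySem.Chars.strip text.toList with ht
    -- the first line starts with the fence
    have hhead := pv_lines_head t
    obtain ⟨t', ht'⟩ := (PySem.Chars.startswith_iff t pvFence).mp h
    cases hl : PySem.Chars.splitOn t ['\n'] with
    | nil => rw [hl] at hhead; simp at hhead
    | cons l0 rest =>
      rw [hl] at hhead
      have hl0 : l0 = t.takeWhile (fun c => c ≠ '\n') := by simpa using hhead
      have hf0 : PySem.Chars.startswith l0 pvFence = true := by
        rw [hl0, ← ht', pvFence]
        simp [List.takeWhile, PySem.Chars.startswith, List.isPrefixOf]
      -- A's result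
      have hA : pvALoop (l0 :: rest) false [] =
          rest.take (rest.findIdx (fun l => PySem.Chars.startswith l pvFence)) := by
        rw [show pvALoop (l0 :: rest) false [] = pvALoop rest true [] by
              simp [pvALoop, hf0],
            pv_aloop_true, pv_takeWhile_eq_take_findIdx]
        simp
      -- B's fences list
      rw [PySem.List.enumerate_cons]
      simp only [List.filterMap_cons, hf0, if_true, zero_add]
      set j := rest.findIdx (fun l => PySem.Chars.startswith l pvFence) with hj
      by_cases ha : rest.any (fun l => PySem.Chars.startswith l pvFence)
      · -- a second fence exists
        have hF := pv_fences_head (fun l => PySem.Chars.startswith l pvFence) rest 1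
        rw [ha] at hF
        rw [if_pos rfl, ← hj] at hF
        cases hFl : (PySem.List.enumerate rest 1).filterMap
            (fun q => if PySem.Chars.startswith q.2 pvFence then some q.1 else none) with
        | nil => rw [hFl] at hF; simp at hF
        | cons f0 F' =>
          rw [hFl] at hF
          have hf0v : f0 = 1 + (j : Int) := by simpa using hF
          have hlen : PySem.List.len (0 :: f0 :: F') > 1 := by
            simp [PySem.List.len_eq]
          rw [if_pos hlen]
          have hget : PySem.List.pyGetD (0 :: f0 :: F') (1 : Int) 0 = f0 := by
            rw [show (1 : Int) = ((1 : Nat) : Int) by norm_num, PySem.List.pyGetD_natCast]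
            rfl
          rw [hget, hf0v,
              show (1 : Int) + (j : Int) = ((1 + j : Nat) : Int) by push_cast; ring,
              show (PySem.List.slice (l0 :: rest) (some 1) (some ((1 + j : Nat) : Int))) =
                PySem.List.slice (l0 :: rest) (some ((1 : Nat) : Int)) (some ((1 + j : Nat) : Int)) by norm_num,
              PySem.List.slice_natCast]
          simp only [List.drop_succ_cons, List.drop_zero, Nat.add_sub_cancel_left]
          rw [hA]
      · -- no second fence
        have hF := pv_fences_head (fun l => PySem.Chars.startswith l pvFence) rest 1
        rw [if_neg ha] at hF
        · have hFnil : (PySem.List.enumerate rest 1).filterMap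
              (fun q => if PySem.Chars.startswith q.2 pvFence then some q.1 else none) = [] :=
            List.head?_eq_none_iff.mp hF
          rw [hFnil]
          have hlen : ¬ (PySem.List.len [(0 : Int)] > 1) := by simp [PySem.List.len_eq]
          rw [if_neg hlen]
          have hrest : rest.takeWhile (fun l => !PySem.Chars.startswith l pvFence) = rest := by
            rw [List.takeWhile_eq_self_iff]
            intro x hx
            simp only [Bool.not_eq_eq_eq_not, Bool.not_true]
            exact Bool.eq_false_iff.mpr (fun hc => ha (List.any_of_mem hx hc))
          have hA' : pvALoop (l0 :: rest) false [] = rest := by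
            rw [show pvALoop (l0 :: rest) false [] = pvALoop rest true [] by
                  simp [pvALoop, hf0],
                pv_aloop_true, hrest]
            simp
          rw [hA', PySem.List.len_eq,
              show ((l0 :: rest).length : Int) = ((rest.length + 1 : Nat) : Int) by simp,
              show (1 : Int) = ((1 : Nat) : Int) by norm_num,
              PySem.List.slice_natCast]
          simp
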